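-- pv_equiv track=rewrite | github.com/ElizabethViera/AdventOfCode | AdventOfCode2018/Day 5/Day5.py | explodeString
-- ===== SOURCE A (Python) =====
-- letters_to_caps = {
--     'a': 'A',
--     'A': 'a',
--     'b': 'B',
--     'B': 'b',
--     'c': 'C',
--     'C': 'c',
--     'd': 'D',
--     'D': 'd',
--     'e': 'E',
--     'E': 'e',
--     'f': 'F',
--     'F': 'f',
--     'g': 'G',
--     'G': 'g',
--     'h': 'H',
--     'H': 'h',
--     'i': 'I',
--     'I': 'i',
--     'j': 'J',
--     'J': 'j',
--     'k': 'K',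
--     'K': 'k',
--     'l': 'L',
--     'L': 'l',
--     'm': 'M',
--     'M': 'm',
--     'n': 'N',
--     'N': 'n',
--     'o': 'O',
--     'O': 'o',
--     'p': 'P',
--     'P': 'p',
--     'q': 'Q',
--     'Q': 'q',
--     'r': 'R',
--     'R': 'r',
--     's': 'S',
--     'S': 's',
--     't': 'T',
--     'T': 't',
--     'u': 'U',
--     'U': 'u',
--     'v': 'V',
--     'V': 'v',
--     'w': 'W',
--     'W': 'w',
--     'x': 'X',
--     'X': 'x',
--     'y': 'Y',
--     'Y': 'y',
--     'z': 'Z',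
--     'Z': 'z',
-- }
--
-- def explodeString(s) -> str:
--     result = ''
--     for c in s:
--         if result == '':
--             result += c
--             continue
--         if letters_to_caps[result[-1]] == c:
--             result = result[:-1]
--         else:
--             result += c
--     return result
-- ===== SOURCE B (Python) =====
-- def explodeString(s) -> str:
--     # Repeatedly sweep the string left to right, deleting every (non-overlapping)
--     # adjacent opposite-case pair found in that sweep, until a sweep changes nothing.
--     # The rewrite system is terminating and confluent, so the fixpoint is the same
--     # fully-reduced polymer A computes.
--     while True:
--         out = []
--         i = 0
--         n = len(s)
--         while i < n:
--             if i + 1 < n and s[i] != s[i + 1] and s[i].lower() == s[i + 1].lower():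
--                 i += 2
--             else:
--                 out.append(s[i])
--                 i += 1
--         t = ''.join(out)
--         if t == s:
--             return s
--         s = t
-- ===== Notes on version B (the rewrite author's own statement) =====
-- stated objective: alternative
-- what changed: Replaces A's single left-to-right stack pass (dict lookup of the top of the growing result string) with repeated whole-string sweeps that delete every adjacent opposite-case pair found, iterated to a fixpoint; correct because the pair-removal rewrite system is terminating and confluent, so the fixpoint equals A's reduced polymer.
import Mathlib
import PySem

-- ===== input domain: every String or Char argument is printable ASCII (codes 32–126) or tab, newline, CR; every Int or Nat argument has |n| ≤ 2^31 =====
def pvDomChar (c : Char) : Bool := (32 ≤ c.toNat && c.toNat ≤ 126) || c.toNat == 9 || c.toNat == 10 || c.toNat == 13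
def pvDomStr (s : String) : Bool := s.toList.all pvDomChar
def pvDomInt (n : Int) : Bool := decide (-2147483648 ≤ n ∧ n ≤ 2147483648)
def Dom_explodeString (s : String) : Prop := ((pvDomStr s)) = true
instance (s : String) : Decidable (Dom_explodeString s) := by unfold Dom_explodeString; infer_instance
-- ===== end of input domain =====

-- B replaces A's single left-to-right stack pass (52-entry swap-case dict, string
-- slicing/concatenation) with repeated whole-string sweeps deleting every adjacent
-- opposite-case pair, iterated to a fixpoint (the rewrite system is terminating and
-- confluent, so the fixpoint is A's reduced polymer); equivalence is proved on Pre_,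
-- exactly the inputs where A returns (A raises KeyError elsewhere).


-- ===== PORT A =====
-- the module-level dict letters_to_caps, verbatim
-- keys are pairwise distinct, so Dict.mk of the pair list is the Python dict literal
def letters_to_caps : PySem.Dict Char Char := PySem.Dict.mk
  [('a','A'),('A','a'),('b','B'),('B','b'),('c','C'),('C','c'),('d','D'),('D','d'),
   ('e','E'),('E','e'),('f','F'),('F','f'),('g','G'),('G','g'),('h','H'),('H','h'),
   ('i','I'),('I','i'),('j','J'),('J','j'),('k','K'),('K','k'),('l','L'),('L','l'),
   ('m','M'),('M','m'),('n','N'),('N','n'),('o','O'),('O','o'),('p','P'),('P','p'),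
   ('q','Q'),('Q','q'),('r','R'),('R','r'),('s','S'),('S','s'),('t','T'),('T','t'),
   ('u','U'),('U','u'),('v','V'),('V','v'),('w','W'),('W','w'),('x','X'),('X','x'),
   ('y','Y'),('Y','y'),('z','Z'),('Z','z')]

-- A's for-loop over the characters of s; `result` is the accumulated string as List Char
def explodeLoopA (result : List Char) (cs : List Char) : List Char :=
  match cs with
  | [] => result
  | c :: rest =>
    if result == [] then explodeLoopA (result ++ [c]) rest   -- result += c; continue
    else
      match PySem.List.pyGet? result (-1) with               -- result[-1]
      | none => result                                        -- unreachable: result ≠ []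
      | some last =>
        match PySem.Dict.get? letters_to_caps last with       -- letters_to_caps[result[-1]]
        | none => result                                      -- Python raises KeyError here; outside Pre_
        | some u =>
          if u == c then explodeLoopA (PySem.List.slice result none (some (-1))) rest  -- result = result[:-1]
          else explodeLoopA (result ++ [c]) rest              -- result += c

def explodeString (s : String) : String := String.ofList (explodeLoopA [] s.toList)

-- ===== PORT B =====
-- B's pair test: s[i] != s[i+1] and s[i].lower() == s[i+1].lower()
def pyCancels (a b : Char) : Bool :=
  a != b && (PySem.Chars.lowerChar a == PySem.Chars.lowerChar b)

-- B's inner while-loop over index i: recursion on the suffix s[i:] — s[i], s[i+1]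
-- are the first two elements; 'i += 2' drops both, else take s[i] and 'i += 1'
def passOnce : List Char → List Char
  | [] => []
  | [a] => [a]
  | a :: b :: r => if pyCancels a b then passOnce r else a :: passOnce (b :: r)

-- a sweep that changes something shortens the string (termination of B's while True)
lemma passOnce_length_le (l : List Char) : (passOnce l).length ≤ l.length := by
  induction l using passOnce.induct with
  | case1 => simp [passOnce]
  | case2 => simp [passOnce]
  | case3 a b r h ih => simp only [passOnce, if_pos h]; simpa using Nat.le_succ_of_le (Nat.le_succ_of_le ih)
  | case4 a b r h ih =>
    simp only [passOnce, if_neg h]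
    simp only [List.length_cons] at ih ⊢
    omega

lemma passOnce_ne_lt (l : List Char) (h : passOnce l ≠ l) : (passOnce l).length < l.length := by
  induction l using passOnce.induct with
  | case1 => simp [passOnce] at h
  | case2 => simp [passOnce] at h
  | case3 a b r hc ih =>
    simp only [passOnce, if_pos hc]
    have hle := passOnce_length_le r
    simp only [List.length_cons]
    omega
  | case4 a b r hc ih =>
    simp only [passOnce, if_neg hc] at h ⊢
    have h2 : passOnce (b :: r) ≠ b :: r := fun he => h (by rw [he])
    have h3 := ih h2
    simp only [List.length_cons] at h3 ⊢
    omega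

-- B's outer 'while True': recompute the sweep until it changes nothing
def fixLoop (s : List Char) : List Char :=
  let t := passOnce s
  if t = s then s else fixLoop t
termination_by s.length
decreasing_by exact passOnce_ne_lt s (by assumption)

def explodeString_alt (s : String) : String := String.ofList (fixLoop s.toList)

-- ===== PRECONDITION & SPEC =====
-- Pre_ is EXACT: A returns normally iff every character except possibly the final one is
-- an ASCII letter (any other character, once on top of the result with a character still
-- to come, is looked up in letters_to_caps and raises KeyError).
def Pre_explodeString (s : String) : Prop :=
  s.toList.dropLast.all PySem.Chars.isalpha = true
instance (s : String) : Decidable (Pre_explodeString s) := by unfold Pre_explodeString; infer_instance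
def pvWitness_explodeString : String := "abBAcD"

def Spec_explodeString (s : String) (out : String) : Prop := out = explodeString_alt s
instance (s : String) (out : String) : Decidable (Spec_explodeString s out) := by unfold Spec_explodeString; infer_instance

-- ===== CLAIM (what is proved, stated in full; the proofs are below) =====
def Claim_equal_explodeString : Prop := ∀ (s : String), Dom_explodeString s → Pre_explodeString s → Spec_explodeString s (explodeString s)

-- ===== LEMMAS AND PROOFS =====

-- the 52 keys of letters_to_caps
def letterChars : List Char :=
  ['A','B','C','D','E','F','G','H','I','J','K','L','M','N','O','P','Q','R','S','T','U','V','W','X','Y','Z',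
   'a','b','c','d','e','f','g','h','i','j','k','l','m','n','o','p','q','r','s','t','u','v','w','x','y','z']

-- what the dict computes, as a function
def swapFn (t : Char) : Char :=
  if PySem.Chars.islower t then PySem.Chars.upperChar t else PySem.Chars.lowerChar t

lemma char_eq_iff (a b : Char) : a = b ↔ a.toNat = b.toNat := by
  rw [Char.ext_iff, ← UInt32.toNat_inj]; rfl

lemma mem_letterChars_of_isalpha (t : Char) (ht : PySem.Chars.isalpha t = true) :
    t ∈ letterChars := by
  simp only [PySem.Chars.isalpha, PySem.Chars.isupper, PySem.Chars.islower, Bool.or_eq_true,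
    Bool.and_eq_true, decide_eq_true_eq] at ht
  have hb : (65 ≤ t.toNat ∧ t.toNat ≤ 90) ∨ (97 ≤ t.toNat ∧ t.toNat ≤ 122) := by
    rcases ht with ⟨h1, h2⟩ | ⟨h1, h2⟩
    · exact Or.inl ⟨UInt32.le_iff_toNat_le.mp h1, UInt32.le_iff_toNat_le.mp h2⟩
    · exact Or.inr ⟨UInt32.le_iff_toNat_le.mp h1, UInt32.le_iff_toNat_le.mp h2⟩
  rcases hb with ⟨h1, h2⟩ | ⟨h1, h2⟩ <;>
    (interval_cases h : t.toNat <;> (rw [← Char.ofNat_toNat t, h]; decide))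

set_option maxRecDepth 8192 in
lemma get?_letters_to_caps (t : Char) (ht : t ∈ letterChars) :
    PySem.Dict.get? letters_to_caps t = some (swapFn t) := by
  fin_cases ht <;> decide

lemma isupper_iff (x : Char) : PySem.Chars.isupper x = true ↔ 65 ≤ x.toNat ∧ x.toNat ≤ 90 := by
  simp only [PySem.Chars.isupper, Bool.and_eq_true, decide_eq_true_eq]
  constructor
  · rintro ⟨h1, h2⟩; exact ⟨UInt32.le_iff_toNat_le.mp h1, UInt32.le_iff_toNat_le.mp h2⟩
  · rintro ⟨h1, h2⟩; exact ⟨UInt32.le_iff_toNat_le.mpr h1, UInt32.le_iff_toNat_le.mpr h2⟩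

lemma islower_iff (x : Char) : PySem.Chars.islower x = true ↔ 97 ≤ x.toNat ∧ x.toNat ≤ 122 := by
  simp only [PySem.Chars.islower, Bool.and_eq_true, decide_eq_true_eq]
  constructor
  · rintro ⟨h1, h2⟩; exact ⟨UInt32.le_iff_toNat_le.mp h1, UInt32.le_iff_toNat_le.mp h2⟩
  · rintro ⟨h1, h2⟩; exact ⟨UInt32.le_iff_toNat_le.mpr h1, UInt32.le_iff_toNat_le.mpr h2⟩

lemma toNat_ofNat_valid (n : Nat) (h : n < 55296) : (Char.ofNat n).toNat = n := by
  have hv : n.isValidChar := Or.inl h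
  unfold Char.ofNat
  split
  · simp [Char.toNat, Char.ofNatAux]
  · exact absurd hv (by assumption)

lemma toNat_lowerChar (x : Char) :
    (PySem.Chars.lowerChar x).toNat =
      if 65 ≤ x.toNat ∧ x.toNat ≤ 90 then x.toNat + 32 else x.toNat := by
  unfold PySem.Chars.lowerChar
  by_cases h : 65 ≤ x.toNat ∧ x.toNat ≤ 90
  · rw [if_pos ((isupper_iff x).mpr h), if_pos h, toNat_ofNat_valid _ (by omega)]
  · rw [if_neg (fun hu => h ((isupper_iff x).mp hu)), if_neg h]

lemma toNat_upperChar (x : Char) (hx : 97 ≤ x.toNat ∧ x.toNat ≤ 122) :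
    (PySem.Chars.upperChar x).toNat = x.toNat - 32 := by
  unfold PySem.Chars.upperChar
  rw [if_pos ((islower_iff x).mpr hx), toNat_ofNat_valid _ (by omega)]

-- pyCancels as an arithmetic relation on code points
lemma pyCancels_iff (a b : Char) : pyCancels a b = true ↔
    a.toNat ≠ b.toNat ∧
    (if 65 ≤ a.toNat ∧ a.toNat ≤ 90 then a.toNat + 32 else a.toNat) =
    (if 65 ≤ b.toNat ∧ b.toNat ≤ 90 then b.toNat + 32 else b.toNat) := by
  simp only [pyCancels, Bool.and_eq_true, bne_iff_ne, ne_eq, beq_iff_eq]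
  rw [char_eq_iff a b, char_eq_iff (PySem.Chars.lowerChar a) (PySem.Chars.lowerChar b),
    toNat_lowerChar, toNat_lowerChar]

-- chained cancellation pins the outer characters: pyCancels t a → pyCancels a b → t = b
lemma cancels_cancels (t a b : Char) (h1 : pyCancels t a = true) (h2 : pyCancels a b = true) :
    t = b := by
  rw [pyCancels_iff] at h1 h2
  rw [char_eq_iff]
  obtain ⟨hne1, he1⟩ := h1
  obtain ⟨hne2, he2⟩ := h2
  split_ifs at he1 he2 <;> omega

-- the crux of the A-side: A's pop test (via the dict) coincides with pyCancels
lemma cond_eq (t c : Char) (ht : PySem.Chars.isalpha t = true) :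
    (swapFn t == c) = pyCancels t c := by
  have hb : (65 ≤ t.toNat ∧ t.toNat ≤ 90) ∨ (97 ≤ t.toNat ∧ t.toNat ≤ 122) := by
    simp only [PySem.Chars.isalpha, Bool.or_eq_true] at ht
    rcases ht with h | h
    · exact Or.inl ((isupper_iff t).mp h)
    · exact Or.inr ((islower_iff t).mp h)
  rw [Bool.eq_iff_iff, pyCancels_iff]
  simp only [beq_iff_eq]
  rw [char_eq_iff (swapFn t) c]
  unfold swapFn
  rcases hb with h | h
  · rw [if_neg (fun hl => by have := (islower_iff t).mp hl; omega), toNat_lowerChar t]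
    split_ifs <;> omega
  · rw [if_pos ((islower_iff t).mpr h), toNat_upperChar t h]
    split_ifs <;> omega

lemma slice_neg_one (xs : List Char) :
    PySem.List.slice xs none (some (-1)) = xs.dropLast := by
  simp [pysem]

-- the reference one-pass stack fold (proof device shared by both directions)
def stepS (S : List Char) (c : Char) : List Char :=
  match S.getLast? with
  | none => S ++ [c]
  | some t => if pyCancels t c then S.dropLast else S ++ [c]

def loopS (S : List Char) (cs : List Char) : List Char := cs.foldl stepS S

-- "no adjacent cancelling pair"
def Red (l : List Char) : Prop := List.IsChain (fun a b => pyCancels a b = false) l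

lemma red_nil : Red [] := List.isChain_nil

lemma stepS_red {S : List Char} (hS : Red S) (c : Char) : Red (stepS S c) := by
  cases hL : S.getLast? with
  | none =>
    rw [List.getLast?_eq_none_iff] at hL; subst hL
    exact List.isChain_singleton c
  | some t =>
    simp only [stepS, hL]
    by_cases hp : pyCancels t c = true
    · rw [if_pos hp]
      exact hS.dropLast
    · rw [if_neg hp]
      refine hS.append (List.isChain_singleton c) ?_
      intro x hx y hy
      simp only [List.head?_cons, Option.mem_def, Option.some.injEq] at hy
      rw [Option.mem_def, hL, Option.some.injEq] at hx
      subst hy; subst hx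
      exact Bool.eq_false_iff.mpr hp

-- two-step cancellation on a reduced stack is a no-op
lemma two_step {S : List Char} (hS : Red S) {a b : Char} (hab : pyCancels a b = true) :
    stepS (stepS S a) b = S := by
  rcases S.eq_nil_or_concat with rfl | ⟨D, t, rfl⟩
  · simp [stepS, hab]
  · simp only [List.concat_eq_append] at hS ⊢
    have hL : (D ++ [t]).getLast? = some t := List.getLast?_concat
    by_cases hp : pyCancels t a = true
    · have htb : t = b := cancels_cancels t a b hp hab
      rw [show stepS (D ++ [t]) a = D from by simp [stepS, hL, hp]]
      rcases D.eq_nil_or_concat with rfl | ⟨E, t2, rfl⟩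
      · simp [stepS, htb]
      · simp only [List.concat_eq_append] at hS ⊢
        have h22 : pyCancels t2 t = false :=
          (List.isChain_append.mp hS).2.2 t2 List.getLast?_concat t (by simp)
        rw [htb] at h22
        simp [stepS, h22, htb]
    · rw [show stepS (D ++ [t]) a = (D ++ [t]) ++ [a] from by simp [stepS, hL, hp]]
      simp [stepS, hab]

lemma loopS_cons (S : List Char) (c : Char) (r : List Char) :
    loopS S (c :: r) = loopS (stepS S c) r := rfl

-- a sweep does not change the value of the stack fold (local confluence, iterated)
lemma pass_invariant (l : List Char) : ∀ S, Red S → loopS S (passOnce l) = loopS S l := by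
  induction l using passOnce.induct with
  | case1 => intro S _; rfl
  | case2 a => intro S _; rfl
  | case3 a b r h ih =>
    intro S hS
    simp only [passOnce, if_pos h]
    rw [ih S hS, loopS_cons, loopS_cons, two_step hS h]
  | case4 a b r h ih =>
    intro S hS
    simp only [passOnce, if_neg h]
    rw [loopS_cons, loopS_cons, ih (stepS S a) (stepS_red hS a)]

-- a sweep that changes nothing means no adjacent pair cancels
lemma pass_fix_red (l : List Char) (h : passOnce l = l) : Red l := by
  induction l using passOnce.induct with
  | case1 => exact red_nil
  | case2 a => exact List.isChain_singleton a
  | case3 a b r hc ih =>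
    exfalso
    simp only [passOnce, if_pos hc] at h
    have h1 := passOnce_length_le r
    have h2 := congrArg List.length h
    simp only [List.length_cons] at h2
    omega
  | case4 a b r hc ih =>
    simp only [passOnce, if_neg hc, List.cons.injEq, true_and] at h
    exact List.isChain_cons_cons.mpr ⟨Bool.eq_false_iff.mpr hc, ih h⟩

-- the stack fold is the identity on a reduced string
lemma loopS_red_eq (l : List Char) : ∀ S, Red (S ++ l) → loopS S l = S ++ l := by
  induction l with
  | nil => intro S _; simp [loopS]
  | cons c r ih =>
    intro S h
    have hstep : stepS S c = S ++ [c] := by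
      cases hL : S.getLast? with
      | none => simp only [stepS, hL]
      | some t =>
        have hcf := (List.isChain_append.mp h).2.2 t hL c (by simp)
        simp only [stepS, hL]
        rw [if_neg (by simp [hcf])]
    rw [loopS_cons, hstep, ih (S ++ [c]) (by simpa using h)]
    simp

-- B's fixpoint computes the stack fold
lemma fixLoop_loopS : ∀ (n : Nat) (l : List Char), l.length ≤ n → fixLoop l = loopS [] l := by
  intro n
  induction n with
  | zero =>
    intro l hl
    have : l = [] := List.length_eq_zero_iff.mp (Nat.le_zero.mp hl)
    subst this
    rw [fixLoop]
    simp [passOnce, loopS]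
  | succ n ih =>
    intro l hl
    rw [fixLoop]
    by_cases he : passOnce l = l
    · simp only [he, if_pos]
      have := loopS_red_eq l [] (by simpa using pass_fix_red l he)
      simpa using this.symm
    · simp only [if_neg he]
      rw [ih (passOnce l) (by have := passOnce_ne_lt l he; omega)]
      exact pass_invariant l [] red_nil

-- A's loop computes the stack fold when the stack holds only letters and all chars
-- still to come, except possibly the final one, are letters
set_option maxRecDepth 8192 in
lemma loopA_eq (cs : List Char) : ∀ acc : List Char,
    (∀ x ∈ acc, PySem.Chars.isalpha x = true) →
    (∀ x ∈ cs.dropLast, PySem.Chars.isalpha x = true) →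
    explodeLoopA acc cs = loopS acc cs := by
  induction cs with
  | nil => intro acc _ _; rfl
  | cons c rest ih =>
    intro acc hacc hcs
    have hrest : ∀ x ∈ rest.dropLast, PySem.Chars.isalpha x = true := by
      intro x hx
      exact hcs x (by
        cases rest with
        | nil => simp at hx
        | cons d ds => simp only [List.dropLast_cons₂, List.mem_cons]; right; exact hx)
    have hc_alpha : rest ≠ [] → PySem.Chars.isalpha c = true := by
      intro hne
      apply hcs c
      cases rest with
      | nil => exact absurd rfl hne
      | cons d ds => simp [List.dropLast_cons₂]
    have happend : rest ≠ [] → ∀ x ∈ acc ++ [c], PySem.Chars.isalpha x = true := by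
      intro hne x hx
      rcases List.mem_append.mp hx with h | h
      · exact hacc x h
      · simp at h; subst h; exact hc_alpha hne
    rw [loopS_cons]
    cases acc with
    | nil =>
      simp only [explodeLoopA, beq_self_eq_true, if_pos, List.nil_append]
      rw [show stepS [] c = [c] from rfl]
      by_cases hrestE : rest = []
      · subst hrestE; rfl
      · exact ih [c] (by intro x hx; simp at hx; subst hx; exact hc_alpha hrestE) hrest
    | cons a as =>
      have hne : (a :: as) ≠ [] := by simp
      have hlastS : (a :: as).getLast? = some ((a :: as).getLast hne) :=
        List.getLast?_eq_some_getLast hne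
      have hlast : PySem.List.pyGet? (a :: as) (-1) = some ((a :: as).getLast hne) := by
        rw [PySem.List.pyGet?_neg_one, hlastS]
      have hmem : (a :: as).getLast hne ∈ (a :: as) := List.getLast_mem hne
      have halpha : PySem.Chars.isalpha ((a :: as).getLast hne) = true := hacc _ hmem
      have hdict := get?_letters_to_caps _ (mem_letterChars_of_isalpha _ halpha)
      simp only [explodeLoopA]
      rw [if_neg (by simp), hlast]
      simp only [hdict, cond_eq _ c halpha]
      rw [show stepS (a :: as) c =
            if pyCancels ((a :: as).getLast hne) c then (a :: as).dropLast else (a :: as) ++ [c]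
          from by unfold stepS; rw [hlastS]]
      by_cases hpop : pyCancels ((a :: as).getLast hne) c = true
      · rw [if_pos hpop, if_pos hpop, slice_neg_one]
        exact ih _ (fun x hx => hacc x (List.dropLast_subset _ hx)) hrest
      · rw [if_neg hpop, if_neg hpop]
        by_cases hrestE : rest = []
        · subst hrestE; rfl
        · exact ih _ (happend hrestE) hrest

-- ===== VERDICT (by name: the statements are the Claim_ definitions above) =====
theorem explodeString_spec : Claim_equal_explodeString := by
  intro s _ hpre
  unfold Spec_explodeString explodeString explodeString_alt
  rw [loopA_eq s.toList [] (by intro x hx; simp at hx) (List.all_eq_true.mp hpre),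
    fixLoop_loopS s.toList.length s.toList le_rfl]
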